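-- pv_equiv track=rewrite | github.com/mrowan137/puzzles | project_euler/48.py | last_m_digits
-- ===== SOURCE A (Python) =====
-- def last_m_digits(n, m):
--     res = 0
--     for i in range(n):
--         partial = i + 1
--         for _ in range(i):
--             # compute i**i, storing just last 10 digits
--             partial *= i + 1
--             partial %= 10 ** m
--
--         res += partial
--         res %= 10 ** m
--
--     return res
-- ===== SOURCE B (Python) =====
-- def last_m_digits(n, m):
--     res = 0
--     for k in range(1, n + 1):
--         mod = 10 ** m
--         base = k % mod
--         e = k
--         r = 1
--         while e > 0:
--             if e & 1:
--                 r = r * base % mod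
--             base = base * base % mod
--             e >>= 1
--         res = (res + r) % mod
--     return res
-- ===== Notes on version B (the rewrite author's own statement) =====
-- stated objective: faster
-- what changed: Each term k^k mod 10^m is computed by binary (square-and-multiply) exponentiation instead of A's k repeated multiplications, making the inner work O(log k) per term instead of O(k).
-- outside the precondition, e.g. on last_m_digits(3, -1): A returns 0.0999999999999982, B returns 0.010999999999999921
import Mathlib
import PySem

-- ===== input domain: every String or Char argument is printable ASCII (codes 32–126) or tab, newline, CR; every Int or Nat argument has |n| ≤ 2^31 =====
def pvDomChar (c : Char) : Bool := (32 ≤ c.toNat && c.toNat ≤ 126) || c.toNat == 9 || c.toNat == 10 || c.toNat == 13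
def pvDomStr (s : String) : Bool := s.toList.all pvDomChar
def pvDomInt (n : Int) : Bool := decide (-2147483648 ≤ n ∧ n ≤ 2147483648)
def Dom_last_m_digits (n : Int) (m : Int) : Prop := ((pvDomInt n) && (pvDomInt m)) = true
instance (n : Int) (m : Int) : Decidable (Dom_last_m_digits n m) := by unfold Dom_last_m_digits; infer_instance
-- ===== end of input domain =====

-- B replaces A's O(k) repeated-multiplication inner loop for k^k mod 10^m by binary
-- (square-and-multiply) exponentiation; the outer accumulation is unchanged.

-- ===== PORT A =====
-- '10 ** m' is ported as 10 ^ m.toNat: it is only evaluated inside the loop (n > 0),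
-- where Pre_ guarantees 0 ≤ m, so the port is exact there.
def last_m_digits (n : Int) (m : Int) : Int :=
  (PySem.List.pyRange 0 n 1).foldl
    (fun res i =>
      let p :=
        (PySem.List.pyRange 0 i 1).foldl
          (fun p _ => PySem.Int.mod (p * (i + 1)) (10 ^ m.toNat)) (i + 1)
      PySem.Int.mod (res + p) (10 ^ m.toNat)) 0

-- ===== PORT B =====
-- the 'while e > 0' loop of Source B; e = k ≥ 1 inside the loop, so e is a Nat
def bpowLoop (r b : Int) (e : Nat) (mod : Int) : Int :=
  if h : e = 0 then r
  else
    bpowLoop (if e % 2 = 1 then PySem.Int.mod (r * b) mod else r)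
      (PySem.Int.mod (b * b) mod) (e / 2) mod
termination_by e
decreasing_by exact Nat.div_lt_self (Nat.pos_of_ne_zero h) one_lt_two

-- as in A's port, '10 ** m' is evaluated only inside the loop, where Pre_ gives 0 ≤ m
def last_m_digits_alt (n : Int) (m : Int) : Int :=
  (PySem.List.pyRange 1 (n + 1) 1).foldl
    (fun res k =>
      let mod := (10 : Int) ^ m.toNat
      PySem.Int.mod (res + bpowLoop 1 (PySem.Int.mod k mod) k.toNat mod) mod) 0

-- ===== PRECONDITION & SPEC =====
-- Pre_ excludes m < 0 with n > 0: there Python's '10 ** m' is a float and A returns a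
-- float, not a value of the declared int type.
def Pre_last_m_digits (n : Int) (m : Int) : Prop := 0 ≤ m ∨ n ≤ 0
instance (n : Int) (m : Int) : Decidable (Pre_last_m_digits n m) := by
  unfold Pre_last_m_digits; infer_instance

def pvWitness_last_m_digits : Int × Int := (10, 5)

def Spec_last_m_digits (n : Int) (m : Int) (out : Int) : Prop := out = last_m_digits_alt n m
instance (n : Int) (m : Int) (out : Int) : Decidable (Spec_last_m_digits n m out) := by
  unfold Spec_last_m_digits; infer_instance

-- ===== CLAIM (what is proved, stated in full; the proofs are below) =====
def Claim_equal_last_m_digits : Prop := ∀ (n : Int) (m : Int), Dom_last_m_digits n m → Pre_last_m_digits n m → Spec_last_m_digits n m (last_m_digits n m)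

-- ===== LEMMAS AND PROOFS =====

theorem pow_emod_int (a M : Int) (n : Nat) : (a % M) ^ n % M = a ^ n % M := by
  induction n with
  | zero => simp
  | succ k ih =>
    rw [pow_succ, pow_succ, Int.mul_emod, ih, Int.emod_emod_of_dvd _ dvd_rfl, ← Int.mul_emod]

theorem mul_emod_congr {M a a' b b' : Int} (ha : a % M = a' % M) (hb : b % M = b' % M) :
    (a * b) % M = (a' * b') % M := by
  rw [Int.mul_emod, ha, hb, ← Int.mul_emod]

-- A's inner loop: |l| repeated multiplications of the unreduced start p by k, mod M
theorem foldl_repmul_mod (M k : Int) (l : List Int) (p : Int) :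
    (l.foldl (fun p _ => (p * k) % M) p) % M = (p * k ^ l.length) % M := by
  induction l generalizing p with
  | nil => simp
  | cons a t ih =>
    simp only [List.foldl_cons, List.length_cons]
    rw [ih, mul_emod_congr (Int.emod_emod_of_dvd _ dvd_rfl) rfl]
    congr 1
    rw [pow_succ]
    ring

-- B's square-and-multiply loop computes r * b ^ e, mod M
theorem bpowLoop_mod (M : Int) (hM : 0 < M) (e : Nat) (r b : Int) :
    bpowLoop r b e M % M = (r * b ^ e) % M := by
  induction e using Nat.strong_induction_on generalizing r b with
  | _ e ih =>
    rw [bpowLoop]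
    by_cases h : e = 0
    · simp [h]
    · simp only [h, dif_neg, not_false_iff]
      rw [ih (e / 2) (Nat.div_lt_self (Nat.pos_of_ne_zero h) one_lt_two)]
      simp only [PySem.Int.mod_eq_emod_of_pos hM]
      have hsq : ((b * b) ^ (e / 2) : Int) = b ^ (2 * (e / 2)) := by
        rw [mul_pow, two_mul, pow_add]
      by_cases hp : e % 2 = 1
      · simp only [hp, if_true]
        rw [mul_emod_congr (Int.emod_emod_of_dvd _ dvd_rfl) (pow_emod_int (b * b) M (e / 2))]
        congr 1
        conv_rhs => rw [show e = 2 * (e / 2) + 1 by omega]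
        rw [pow_add, hsq, pow_one]
        ring
      · simp only [hp, if_false]
        rw [mul_emod_congr (rfl : r % M = r % M) (pow_emod_int (b * b) M (e / 2))]
        congr 1
        conv_rhs => rw [show e = 2 * (e / 2) by omega]
        rw [hsq]

-- folding '(res + t x) % M' only depends on each term mod M
theorem foldl_mod_congr (M : Int) (t1 t2 : Nat → Int) (l : List Nat)
    (h : ∀ x ∈ l, t1 x % M = t2 x % M) (res : Int) :
    l.foldl (fun r x => (r + t1 x) % M) res = l.foldl (fun r x => (r + t2 x) % M) res := by
  induction l generalizing res with
  | nil => rfl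
  | cons a t ih =>
    simp only [List.foldl_cons]
    rw [show (res + t1 a) % M = (res + t2 a) % M by
      rw [Int.add_emod, h a (List.mem_cons_self ..), ← Int.add_emod]]
    exact ih (fun x hx => h x (List.mem_cons_of_mem _ hx)) _

-- ===== VERDICT (by name: the statement is the Claim_ definition above) =====
theorem last_m_digits_spec : Claim_equal_last_m_digits := by
  intro n m _ _
  unfold Spec_last_m_digits last_m_digits last_m_digits_alt
  have hM : (0 : Int) < 10 ^ m.toNat := pow_pos (by norm_num) _
  rw [PySem.List.pyRange_one 0 n, PySem.List.pyRange_one 1 (n + 1)]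
  simp only [sub_zero, add_sub_cancel_right, List.foldl_map,
    PySem.Int.mod_eq_emod_of_pos hM]
  apply foldl_mod_congr
  intro j _
  set M : Int := 10 ^ m.toNat with hMdef
  have h1 : (PySem.List.pyRange 0 (0 + (j : Int)) 1).length = j := by
    rw [PySem.List.length_pyRange_one]; omega
  have hA := foldl_repmul_mod M (0 + (j : Int) + 1)
    (PySem.List.pyRange 0 (0 + (j : Int)) 1) (0 + (j : Int) + 1)
  rw [h1] at hA
  rw [show ((1 : Int) + (j : Int)).toNat = j + 1 by omega]
  rw [hA, bpowLoop_mod M hM (j + 1) 1 ((1 + (j : Int)) % M), one_mul]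
  rw [pow_emod_int]
  congr 1
  ring
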